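-- pv_equiv track=rewrite | github.com/tajo9128/BioDockify-Pharma-AI | plugins/_time_travel/helpers/time_travel.py | _is_safe_plugin_asset
-- ===== SOURCE A (Python) =====
-- SAFE_PLUGIN_ASSET_NAMES = {
--     "config.json",
--     "presets.yaml",
--     ".toggle-0",
--     ".toggle-1",
-- }
--
-- def _is_safe_plugin_asset(rel: str) -> bool:
--     parts = rel.split("/")
--     if len(parts) < 4:
--         return False
--     for index, part in enumerate(parts):
--         if part != "plugins":
--             continue
--         tail = parts[index + 1 :]
--         if len(tail) == 2 and tail[1] in SAFE_PLUGIN_ASSET_NAMES: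
--             return True
--     return False
-- ===== SOURCE B (Python) =====
-- SAFE_PLUGIN_ASSET_NAMES = {
--     "config.json",
--     "presets.yaml",
--     ".toggle-0",
--     ".toggle-1",
-- }
--
-- def _is_safe_plugin_asset(rel: str) -> bool:
--     parts = rel.split("/")
--     return (
--         len(parts) >= 4
--         and parts[-3] == "plugins"
--         and parts[-1] in SAFE_PLUGIN_ASSET_NAMES
--     )
-- ===== Notes on version B (the rewrite author's own statement) =====
-- stated objective: simpler
-- what changed: The enumerate-scan over all segments with per-hit tail slicing is replaced by a single closed-form positional check: only the segment three from the end can yield a 2-element tail, so B just guards the segment count (>= 4) and checks the third-from-last segment against the marker and the last segment against the allowed set.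
import Mathlib
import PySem

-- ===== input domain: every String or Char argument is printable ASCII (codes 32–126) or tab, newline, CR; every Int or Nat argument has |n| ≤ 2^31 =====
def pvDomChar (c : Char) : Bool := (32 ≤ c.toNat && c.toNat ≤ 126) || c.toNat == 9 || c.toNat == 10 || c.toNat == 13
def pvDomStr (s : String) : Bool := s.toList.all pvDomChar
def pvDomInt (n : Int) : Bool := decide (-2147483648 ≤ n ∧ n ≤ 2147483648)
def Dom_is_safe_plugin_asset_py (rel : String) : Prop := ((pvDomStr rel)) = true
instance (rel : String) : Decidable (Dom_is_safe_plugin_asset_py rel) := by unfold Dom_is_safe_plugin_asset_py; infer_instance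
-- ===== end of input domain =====

-- B replaces A's enumerate-scan for "plugins" with a direct positional check of
-- parts[-3] and parts[-1] (objective: simpler).

def safePluginAssetNames : PySem.Set String :=
  PySem.Set.ofList ["config.json", "presets.yaml", ".toggle-0", ".toggle-1"]

-- ===== PORT A =====
-- the 'for index, part in enumerate(parts)' loop with its early 'return True'
def isSafeLoopA (parts : List String) (i : Nat) : List String → Bool
  | [] => false
  | part :: rest =>
    if part ≠ "plugins" then isSafeLoopA parts (i + 1) rest
    else
      let tail := PySem.List.slice parts (some ((i : Int) + 1)) none
      if (tail.length == 2) && safePluginAssetNames.contains (PySem.List.pyGetD tail 1 "") then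
        true
      else isSafeLoopA parts (i + 1) rest

def is_safe_plugin_asset_py (rel : String) : Bool :=
  let parts := (PySem.Str.split? rel "/").getD []
  if parts.length < 4 then false
  else isSafeLoopA parts 0 parts

-- ===== PORT B =====
def is_safe_plugin_asset_py_alt (rel : String) : Bool :=
  let parts := (PySem.Str.split? rel "/").getD []
  decide (4 ≤ parts.length)
    && (PySem.List.pyGetD parts (-3) "" == "plugins")
    && safePluginAssetNames.contains (PySem.List.pyGetD parts (-1) "")

-- ===== PRECONDITION & SPEC =====
def Spec_is_safe_plugin_asset_py (rel : String) (out : Bool) : Prop := out = is_safe_plugin_asset_py_alt rel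
instance (rel : String) (out : Bool) : Decidable (Spec_is_safe_plugin_asset_py rel out) := by unfold Spec_is_safe_plugin_asset_py; infer_instance

-- ===== CLAIM (what is proved, stated in full; the proofs are below) =====
def Claim_equal_is_safe_plugin_asset_py : Prop := ∀ (rel : String), Dom_is_safe_plugin_asset_py rel → Spec_is_safe_plugin_asset_py rel (is_safe_plugin_asset_py rel)

-- ===== LEMMAS AND PROOFS =====

-- what A's loop computes on the remaining suffix: only the step whose tail has
-- exactly 2 elements (i.e. rest.length = 3 at that step) can return True
def loopRhs (rest : List String) : Bool :=
  decide (3 ≤ rest.length)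
    && (rest.getD (rest.length - 3) "" == "plugins")
    && safePluginAssetNames.contains (rest.getD (rest.length - 1) "")

lemma isSafeLoopA_cons (parts : List String) (i : Nat) (part : String) (rest : List String) :
    isSafeLoopA parts i (part :: rest) =
      if part ≠ "plugins" then isSafeLoopA parts (i + 1) rest
      else
        if ((PySem.List.slice parts (some ((i : Int) + 1)) none).length == 2)
            && safePluginAssetNames.contains
                (PySem.List.pyGetD (PySem.List.slice parts (some ((i : Int) + 1)) none) 1 "") then
          true
        else isSafeLoopA parts (i + 1) rest := rfl

lemma isSafeLoopA_eq (parts : List String) :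
    ∀ (rest : List String) (i : Nat), rest = parts.drop i →
      isSafeLoopA parts i rest = loopRhs rest := by
  intro rest
  induction rest with
  | nil => intro i _; simp [isSafeLoopA, loopRhs]
  | cons part rest' ih =>
    intro i hr
    have hr' : rest' = parts.drop (i + 1) := by
      have h1 : parts.drop (i + 1) = (parts.drop i).drop 1 := by rw [List.drop_drop]
      rw [h1, ← hr]; rfl
    have tail_eq : PySem.List.slice parts (some ((i : Int) + 1)) none = rest' := by
      have hc : ((i : Int) + 1) = ((i + 1 : Nat) : Int) := by push_cast; ring
      rw [hc, PySem.List.slice_from_natCast, ← hr']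
    rw [isSafeLoopA_cons, tail_eq, ih _ hr']
    by_cases h3 : 3 ≤ rest'.length
    · have hne : (rest'.length == 2) = false := by simp; omega
      have e1 : rest'.length + 1 - 3 = (rest'.length - 3) + 1 := by omega
      have e2 : rest'.length + 1 - 1 = (rest'.length - 1) + 1 := by omega
      simp only [hne, Bool.false_and, Bool.false_eq_true, if_false, loopRhs,
        List.length_cons, e1, e2, List.getD_cons_succ]
      have d2 : decide (3 ≤ rest'.length) = decide (3 ≤ rest'.length + 1) :=
        decide_eq_decide.mpr (by omega)
      rw [d2]
      split_ifs <;> rfl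
    · match rest', h3 with
      | [], _ => by_cases hp : part = "plugins" <;> simp [hp, loopRhs]
      | [x], _ => by_cases hp : part = "plugins" <;> simp [hp, loopRhs]
      | [x, y], _ =>
        have hy : PySem.List.pyGetD [x, y] 1 "" = y := rfl
        rw [hy]
        by_cases hp : part = "plugins" <;> simp [hp, loopRhs]
      | x :: y :: z :: t, h3 => simp at h3

-- ===== VERDICT (by name: the statement is the Claim_ definition above) =====
theorem is_safe_plugin_asset_py_spec : Claim_equal_is_safe_plugin_asset_py := by
  intro rel _
  unfold Spec_is_safe_plugin_asset_py is_safe_plugin_asset_py is_safe_plugin_asset_py_alt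
  dsimp only
  generalize (PySem.Str.split? rel "/").getD [] = parts
  by_cases h4 : parts.length < 4
  · simp [h4, show ¬ (4 ≤ parts.length) by omega]
  · have h4' : 4 ≤ parts.length := by omega
    rw [if_neg h4, isSafeLoopA_eq parts parts 0 (by simp)]
    have g3 : PySem.List.pyGetD parts (-3) "" = parts[parts.length - 3] :=
      PySem.List.pyGetD_neg_ofNat parts 3 "" (by omega) (by omega)
    have g1 : PySem.List.pyGetD parts (-1) "" = parts[parts.length - 1] :=
      PySem.List.pyGetD_neg_ofNat parts 1 "" (by omega) (by omega)
    have e3 : parts.getD (parts.length - 3) "" = parts[parts.length - 3] :=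
      List.getD_eq_getElem parts "" (by omega)
    have e1 : parts.getD (parts.length - 1) "" = parts[parts.length - 1] :=
      List.getD_eq_getElem parts "" (by omega)
    rw [loopRhs, g3, g1, e3, e1, decide_eq_true (show 3 ≤ parts.length by omega),
      decide_eq_true h4']
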